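-- pv_equiv track=rewrite | github.com/Vedanjalee/Py_CODE | 30Jan/Find the Longest Palindromic Rotation of a String.py | longest_palindromic_rotation
-- ===== SOURCE A (Python) =====
-- def longest_palindromic_rotation(s):
--     n = len(s)
--     max_palindrome = ""
--
--     for i in range(n):
--         rotated = s[i:] + s[:i]
--         if rotated == rotated[::-1] and len(rotated) > len(max_palindrome):
--             max_palindrome = rotated
--
--
--     if max_palindrome:
--         return max_palindrome
--     else:
--         return "No palindromic rotation"
-- ===== SOURCE B (Python) =====
-- def _manacher(t, e):
--     # d[c] = number of palindromes of parity (1-e) centred at c (odd if e=0,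
--     # even-gap before position c if e=1), computed in O(len(t)) by mirror reuse.
--     m = len(t)
--     d = []
--     l, r = 0, -1
--     for c in range(m):
--         k = 0 if c > r else min(d[l + r - c + e], r - c + 1)
--         while c - k - e >= 0 and c + k < m and t[c - k - e] == t[c + k]:
--             k += 1
--         d.append(k)
--         if c + k - 1 > r:
--             l = c - k + 1 - e
--             r = c + k - 1
--     return d
--
-- def longest_palindromic_rotation(s):
--     # A palindromic rotation of s is exactly a length-n palindromic substring of
--     # t = s+s; Manacher radii of t locate the first one in O(n).
--     n = len(s)
--     t = s + s
--     e = 1 - n % 2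
--     h = n // 2
--     d = _manacher(t, e)
--     for i in range(n):
--         if d[i + h] >= h + 1 - e:
--             return t[i:i + n]
--     return "No palindromic rotation"
-- ===== Notes on version B (the rewrite author's own statement) =====
-- stated objective: faster
-- what changed: B never enumerates and reverses rotations: it runs Manacher's algorithm (mirror-reuse radius computation) on the doubled string s+s and returns the slice at the first start index whose palindromic radius covers length n, instead of A's per-rotation build-and-reverse check.
import Mathlib
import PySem

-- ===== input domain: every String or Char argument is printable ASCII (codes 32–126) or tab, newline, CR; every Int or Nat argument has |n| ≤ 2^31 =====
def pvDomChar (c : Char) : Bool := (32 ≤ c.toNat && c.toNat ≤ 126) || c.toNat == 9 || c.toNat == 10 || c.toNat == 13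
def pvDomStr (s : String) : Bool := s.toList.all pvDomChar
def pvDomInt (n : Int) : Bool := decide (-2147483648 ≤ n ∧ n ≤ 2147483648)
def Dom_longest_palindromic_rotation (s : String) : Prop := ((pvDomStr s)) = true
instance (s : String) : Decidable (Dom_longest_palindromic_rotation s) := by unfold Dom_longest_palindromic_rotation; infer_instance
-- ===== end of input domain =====

-- B replaces A's rotate-reverse-compare scan by Manacher's algorithm on the doubled
-- string s+s (objective: faster — O(n) instead of O(n^2)).

-- ===== PORT A =====
def longest_palindromic_rotation (s : String) : String :=
  let n : Int := PySem.Str.len s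
  let maxPalindrome : List Char :=
    (PySem.List.pyRange 0 n 1).foldl
      (fun (m : List Char) (i : Int) =>
        let rotated : List Char :=
          PySem.List.slice s.toList (some i) none ++ PySem.List.slice s.toList none (some i)
        if some rotated = PySem.List.slice? rotated none none (-1) ∧ rotated.length > m.length
        then rotated else m) []
  if maxPalindrome ≠ [] then String.ofList maxPalindrome else "No palindromic rotation"

-- ===== PORT B =====
-- the 'while c - k - e >= 0 and c + k < m and t[c-k-e] == t[c+k]' guard of Source B
def pvCondB (t : List Char) (e c k : Int) : Bool :=
  decide (0 ≤ c - k - e) && decide (c + k < (t.length : Int)) &&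
  (t.getD (c - k - e).toNat ' ' == t.getD (c + k).toNat ' ')

-- the 'while … : k += 1' expansion loop of Source B
def pvExpand (t : List Char) (e c k : Int) : Int :=
  if pvCondB t e c k then pvExpand t e c (k + 1) else k
termination_by ((t.length : Int) - (c + k)).toNat
decreasing_by
  rename_i h
  simp only [pvCondB, Bool.and_eq_true, decide_eq_true_eq] at h
  omega

-- one iteration of Source B's 'for c in range(m)' body; state = (d, l, r)
def pvManStep (t : List Char) (e : Int) (st : List Int × Int × Int) (c : Int) :
    List Int × Int × Int :=
  let d := st.1
  let l := st.2.1
  let r := st.2.2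
  let k0 : Int := if r < c then 0 else min (d.getD (l + r - c + e).toNat 0) (r - c + 1)
  let k := pvExpand t e c k0
  let d' := d ++ [k]
  if r < c + k - 1 then (d', c - k + 1 - e, c + k - 1) else (d', l, r)

def pvManacher (t : List Char) (e : Int) : List Int :=
  ((PySem.List.pyRange 0 (t.length : Int) 1).foldl (pvManStep t e) ([], 0, -1)).1

def longest_palindromic_rotation_alt (s : String) : String :=
  let l := s.toList
  let n : Int := (l.length : Int)
  let t := l ++ l
  let e : Int := 1 - PySem.Int.mod n 2
  let h : Int := PySem.Int.floordiv n 2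
  let d := pvManacher t e
  match (PySem.List.pyRange 0 n 1).find?
      (fun i => decide (h + 1 - e ≤ d.getD (i + h).toNat 0)) with
  | some i => String.ofList (PySem.List.slice t (some i) (some (i + n)))
  | none => "No palindromic rotation"

-- ===== PRECONDITION & SPEC =====
def Spec_longest_palindromic_rotation (s : String) (out : String) : Prop := out = longest_palindromic_rotation_alt s
instance (s : String) (out : String) : Decidable (Spec_longest_palindromic_rotation s out) := by unfold Spec_longest_palindromic_rotation; infer_instance

-- ===== CLAIM (what is proved, stated in full; the proofs are below) =====
def Claim_equal_longest_palindromic_rotation : Prop := ∀ (s : String), Dom_longest_palindromic_rotation s → Spec_longest_palindromic_rotation s (longest_palindromic_rotation s)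

-- ===== LEMMAS AND PROOFS =====

-- rotation by k of l
def pvRot (l : List Char) (k : Nat) : List Char := l.drop k ++ l.take k

-- A's fold, over Nat indices
def pvAfold (l : List Char) (ks : List Nat) (m : List Char) : List Char :=
  ks.foldl
    (fun m k =>
      if pvRot l k = (pvRot l k).reverse ∧ m.length < (pvRot l k).length then pvRot l k else m) m

-- the shared "rotation k is a palindrome" predicate
def pvP (l : List Char) : Nat → Bool := fun j => decide (pvRot l j = (pvRot l j).reverse)

lemma pvRot_length (l : List Char) (k : Nat) : (pvRot l k).length = l.length := by
  simp [pvRot]; omega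

-- bridge: port A computed through pvAfold on Nat indices
lemma A_eq (s : String) :
    longest_palindromic_rotation s =
      (if pvAfold s.toList (List.range s.toList.length) [] ≠ [] then
        String.ofList (pvAfold s.toList (List.range s.toList.length) []) else
        "No palindromic rotation") := by
  unfold longest_palindromic_rotation pvAfold
  simp only [PySem.Str.len_eq, PySem.List.pyRange_one, sub_zero, Int.toNat_natCast,
    List.foldl_map, zero_add, PySem.List.slice_from_natCast, PySem.List.slice_to_natCast,
    PySem.List.slice?_none_none_neg_one, Option.some.injEq, pvRot, gt_iff_lt]

-- the accumulator, once full-length, never changes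
lemma pvAfold_full (l : List Char) (ks : List Nat) (m : List Char)
    (hm : m.length = l.length) : pvAfold l ks m = m := by
  induction ks with
  | nil => rfl
  | cons k ks ih =>
    unfold pvAfold
    simp only [List.foldl_cons]
    rw [if_neg (by rw [pvRot_length]; omega)]
    exact ih

-- A's fold from [] returns the first palindromic rotation (or [])
lemma pvAfold_char (l : List Char) (ks : List Nat) :
    pvAfold l ks [] =
      (match ks.find? (pvP l) with
       | some k => pvRot l k
       | none => []) := by
  induction ks with
  | nil => rfl
  | cons k ks ih =>
    by_cases hp : pvRot l k = (pvRot l k).reverse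
    · rw [List.find?_cons_of_pos (by simp only [pvP, decide_eq_true_eq]; exact hp)]
      unfold pvAfold
      simp only [List.foldl_cons, List.length_nil]
      rcases Nat.eq_zero_or_pos l.length with h0 | hpos
      · have hrot : pvRot l k = [] := by
          have := pvRot_length l k
          exact List.length_eq_zero_iff.mp (by omega)
        rw [if_neg (by rw [pvRot_length]; omega)]
        show pvAfold l ks [] = _
        rw [ih]
        cases hf : ks.find? (pvP l) with
        | none => simp [hrot]
        | some k' =>
          have : pvRot l k' = [] := by
            have := pvRot_length l k'
            exact List.length_eq_zero_iff.mp (by omega)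
          simp [hrot, this]
      · rw [if_pos ⟨hp, by rw [pvRot_length]; omega⟩]
        exact pvAfold_full l ks _ (pvRot_length l k)
    · rw [List.find?_cons_of_neg (by simp only [pvP, decide_eq_true_eq]; exact hp)]
      unfold pvAfold
      simp only [List.foldl_cons, List.length_nil]
      rw [if_neg (by intro h; exact hp h.1)]
      exact ih

-- ---------- proof-side vocabulary for the Manacher port ----------

def pvTA (t : List Char) (x : Int) : Char := t.getD x.toNat ' '

def pvCondP (t : List Char) (e c k : Int) : Prop :=
  0 ≤ c - k - e ∧ c + k < (t.length : Int) ∧ pvTA t (c - k - e) = pvTA t (c + k)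

def pvOk (t : List Char) (e c k : Int) : Prop :=
  ∀ j : Int, 0 ≤ j → j < k → pvCondP t e c j

def pvRefl (t : List Char) (l r : Int) : Prop :=
  ∀ x : Int, l ≤ x → x ≤ r → pvTA t x = pvTA t (l + r - x)

lemma pvCondB_iff (t : List Char) (e c k : Int) :
    pvCondB t e c k = true ↔ pvCondP t e c k := by
  simp [pvCondB, pvCondP, pvTA, and_assoc]

lemma pvOk_mono (t : List Char) (e c k k' : Int) (h : k ≤ k') (hok : pvOk t e c k') :
    pvOk t e c k := fun j h0 hj => hok j h0 (by omega)

-- pvExpand from a sound start reaches a state that is sound and maximal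
lemma pvExpand_char (t : List Char) (e c k : Int) (hk : 0 ≤ k) (hok : pvOk t e c k) :
    0 ≤ pvExpand t e c k ∧ pvOk t e c (pvExpand t e c k) ∧
      ¬ pvCondP t e c (pvExpand t e c k) := by
  revert hk hok
  fun_induction pvExpand t e c k with
  | case1 k hcond ih =>
    intro hk hok
    refine ih (by omega) ?_
    intro j h0 hj
    by_cases hjk : j < k
    · exact hok j h0 hjk
    · have : j = k := by omega
      subst this
      exact (pvCondB_iff t e c j).mp hcond
  | case2 k hcond =>
    intro hk hok
    exact ⟨hk, hok, fun h => hcond ((pvCondB_iff t e c k).mpr h)⟩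

lemma pvExpand_unique (t : List Char) (e c K : Int) (h0 : 0 ≤ K)
    (hok : pvOk t e c K) (hnc : ¬ pvCondP t e c K) :
    pvExpand t e c 0 = K := by
  obtain ⟨h0', hok', hnc'⟩ := pvExpand_char t e c 0 le_rfl (fun j h0 hj => absurd h0 (by omega))
  set K' := pvExpand t e c 0 with hK'
  rcases lt_trichotomy K K' with h | h | h
  · exact absurd (hok' K h0 h) hnc
  · omega
  · exact absurd (hok K' h0' h) hnc'

lemma pvMaxK_ge_iff (t : List Char) (e c v : Int) :
    v ≤ pvExpand t e c 0 ↔ pvOk t e c v := by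
  obtain ⟨h0', hok', hnc'⟩ := pvExpand_char t e c 0 le_rfl (fun j h0 hj => absurd h0 (by omega))
  constructor
  · intro h
    exact pvOk_mono t e c v _ h hok'
  · intro h
    by_contra hlt
    exact hnc' (h (pvExpand t e c 0) h0' (by omega))

-- the mirror argument: a sound radius at the reflected centre is sound at c
lemma pvMirror (t : List Char) (e l r c k0 : Int) (he : e = 0 ∨ e = 1)
    (hRefl : pvRefl t l r) (_hl : 0 ≤ l) (hrm : r < (t.length : Int))
    (hsum : l + r + e ≤ 2 * c - 2) (_hcr : c ≤ r)
    (hk0d : pvOk t e (l + r - c + e) k0) (hk0r : k0 ≤ r - c + 1) :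
    pvOk t e c k0 := by
  intro j hj0 hjk
  obtain ⟨h1, h2, h3⟩ := hk0d j hj0 (by omega)
  refine ⟨by omega, by omega, ?_⟩
  have ha : pvTA t (c + j) = pvTA t ((l + r - c + e) - j - e) := by
    have hx := hRefl (c + j) (by omega) (by omega)
    rw [hx]
    congr 1
    ring
  have hb : pvTA t ((l + r - c + e) + j) = pvTA t (c - j - e) := by
    have hx := hRefl ((l + r - c + e) + j) (by omega) (by omega)
    rw [hx]
    congr 1
    ring
  rw [ha] at *
  rw [← hb, ← h3]

-- ---------- the loop invariant ----------

def pvInv (t : List Char) (e : Int) (cn : Nat) (st : List Int × Int × Int) : Prop :=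
  st.1.length = cn ∧
  (∀ j : Nat, j < cn → st.1.getD j 0 = pvExpand t e (j : Int) 0) ∧
  0 ≤ st.2.1 ∧ st.2.1 ≤ st.2.2 + 1 ∧ st.2.2 < (t.length : Int) ∧
  pvRefl t st.2.1 st.2.2 ∧
  ((cn : Int) ≤ st.2.2 → st.2.1 + st.2.2 + e ≤ 2 * (cn : Int) - 2)

lemma pvInv_step (t : List Char) (e : Int) (he : e = 0 ∨ e = 1) (cn : Nat)
    (hcn : cn < t.length) (st : List Int × Int × Int) (hinv : pvInv t e cn st) :
    pvInv t e (cn + 1) (pvManStep t e st (cn : Int)) := by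
  obtain ⟨d, l, r⟩ := st
  obtain ⟨hlen, hd, hl0, hlr, hrm, hRefl, hsum⟩ := hinv
  dsimp only at hlen hd hl0 hlr hrm hRefl hsum
  have he01 : 0 ≤ e ∧ e ≤ 1 := by rcases he with h | h <;> omega
  set c : Int := (cn : Int) with hc
  set k0 : Int := if r < c then 0 else min (d.getD (l + r - c + e).toNat 0) (r - c + 1) with hk0
  have hmax0 : ∀ c' : Int, 0 ≤ pvExpand t e c' 0 :=
    fun c' => (pvExpand_char t e c' 0 le_rfl (fun j h0 hj => absurd h0 (by omega))).1
  have hk00 : 0 ≤ k0 := by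
    rw [hk0]
    split_ifs with hrc
    · exact le_rfl
    · have h1 : (0:Int) ≤ d.getD (l + r - c + e).toNat 0 := by
        have hcr : c ≤ r := by omega
        have hs := hsum (by omega)
        have hc'0 : 0 ≤ l + r - c + e := by omega
        have hc'lt : l + r - c + e < c := by omega
        rw [hd (l + r - c + e).toNat (by omega), Int.toNat_of_nonneg hc'0]
        exact hmax0 _
      exact le_min h1 (by omega)
  have hok0 : pvOk t e c k0 := by
    rw [hk0]
    split_ifs with hrc
    · intro j h0 hj; omega
    · have hcr : c ≤ r := by omega
      have hs := hsum (by omega)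
      have hc'0 : 0 ≤ l + r - c + e := by omega
      have hdval : d.getD (l + r - c + e).toNat 0 = pvExpand t e (l + r - c + e) 0 := by
        rw [hd (l + r - c + e).toNat (by omega), Int.toNat_of_nonneg hc'0]
      have hokm : pvOk t e (l + r - c + e)
          (min (d.getD (l + r - c + e).toNat 0) (r - c + 1)) := by
        apply pvOk_mono t e _ _ (pvExpand t e (l + r - c + e) 0)
        · rw [hdval]; exact min_le_left _ _
        · exact (pvExpand_char t e _ 0 le_rfl (fun j h0 hj => absurd h0 (by omega))).2.1
      exact pvMirror t e l r c _ he hRefl hl0 hrm hs hcr hokm (min_le_right _ _)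
  have hkeq : pvExpand t e c k0 = pvExpand t e c 0 := by
    obtain ⟨a, b, cc⟩ := pvExpand_char t e c k0 hk00 hok0
    exact (pvExpand_unique t e c _ a b cc).symm
  obtain ⟨hK0, hokK, hncK⟩ :=
    pvExpand_char t e c 0 le_rfl (fun j h0 hj => absurd h0 (by omega))
  set K : Int := pvExpand t e c 0 with hKdef
  have hK1 : e = 0 → 1 ≤ K := by
    intro he0
    by_contra hlt
    apply hncK
    have hz : K = 0 := by omega
    rw [hz, he0]
    refine ⟨by omega, by omega, ?_⟩
    have hix : c - 0 - 0 = c + 0 := by ring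
    rw [hix]
  have hstep : pvManStep t e (d, l, r) c =
      (if r < c + K - 1 then (d ++ [K], c - K + 1 - e, c + K - 1) else (d ++ [K], l, r)) := by
    simp only [pvManStep]
    rw [← hk0, hkeq]
  have hgetD : ∀ j : Nat, j < cn + 1 → (d ++ [K]).getD j 0 = pvExpand t e (j : Int) 0 := by
    intro j hj
    rcases Nat.lt_or_ge j cn with h | h
    · rw [List.getD_append _ _ _ _ (by omega)]
      exact hd j h
    · have hj' : j = cn := by omega
      subst hj'
      rw [List.getD_eq_getElem _ _ (by simp [hlen])]
      rw [List.getElem_append_right (by omega)]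
      simp [hlen]
      rw [hKdef, hc]
  rw [hstep]
  split_ifs with hupd
  · simp only [pvInv]
    refine ⟨by simp [hlen], hgetD, ?_, ?_, ?_, ?_, ?_⟩
    · by_cases hKp : 1 ≤ K
      · have := (hokK (K - 1) (by omega) (by omega)).1
        omega
      · rcases he with he0 | he1
        · have := hK1 he0; omega
        · omega
    · rcases he with he0 | he1
      · have := hK1 he0; omega
      · omega
    · by_cases hKp : 1 ≤ K
      · have := (hokK (K - 1) (by omega) (by omega)).2.1
        omega
      · omega
    · intro x hx1 hx2
      by_cases hxc : c ≤ x
      · obtain ⟨h1, h2, h3⟩ := hokK (x - c) (by omega) (by omega)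
        have e1 : c + (x - c) = x := by ring
        have e2 : c - K + 1 - e + (c + K - 1) - x = c - (x - c) - e := by ring
        rw [e1] at h3
        rw [e2, ← h3]
      · obtain ⟨h1, h2, h3⟩ := hokK (c - e - x) (by omega) (by omega)
        have e1 : c - (c - e - x) - e = x := by ring
        have e2 : c - K + 1 - e + (c + K - 1) - x = c + (c - e - x) := by ring
        rw [e1] at h3
        rw [e2, ← h3]
    · intro _
      push_cast
      omega
  · simp only [pvInv]
    refine ⟨by simp [hlen], hgetD, hl0, hlr, hrm, hRefl, ?_⟩
    intro hcr
    have := hsum (by push_cast at hcr ⊢; omega)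
    push_cast at hcr ⊢
    omega

lemma pvFold_inv (t : List Char) (e : Int) (he : e = 0 ∨ e = 1) :
    ∀ cn : Nat, cn ≤ t.length →
      pvInv t e cn (((List.range cn).map (fun k : Nat => (k : Int))).foldl
        (pvManStep t e) ([], 0, -1)) := by
  intro cn
  induction cn with
  | zero =>
    intro _
    simp only [List.range_zero, List.map_nil, List.foldl_nil, pvInv]
    refine ⟨rfl, fun j hj => absurd hj (by omega), le_rfl, by omega, by omega, ?_, ?_⟩
    · intro x h1 h2
      exact absurd h2 (by omega)
    · intro h
      exact absurd h (by omega)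
  | succ n ih =>
    intro h
    rw [List.range_succ, List.map_append, List.foldl_append]
    simp only [List.map_cons, List.map_nil, List.foldl_cons, List.foldl_nil]
    exact pvInv_step t e he n (by omega) _ (ih (by omega))

lemma pvManacher_getD (t : List Char) (e : Int) (he : e = 0 ∨ e = 1) (j : Nat)
    (hj : j < t.length) :
    (pvManacher t e).getD j 0 = pvExpand t e (j : Int) 0 := by
  unfold pvManacher
  rw [PySem.List.pyRange_one]
  simp only [sub_zero, Int.toNat_natCast, zero_add]
  exact (pvFold_inv t e he t.length le_rfl).2.1 j hj

-- ---------- from radii to palindromic rotations ----------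

lemma pvRot_eq_window (l : List Char) (i : Nat) (hi : i ≤ l.length) :
    pvRot l i = ((l ++ l).drop i).take l.length := by
  rw [List.drop_append, Nat.sub_eq_zero_of_le hi, List.drop_zero, List.take_append]
  rw [List.take_of_length_le (by simp)]
  have hx : l.length - (List.drop i l).length = i := by
    simp only [List.length_drop]
    omega
  rw [hx]
  rfl

lemma pvPal_iff_pairs (r : List Char) :
    r = r.reverse ↔
      ∀ a : Nat, a < r.length → r.getD a ' ' = r.getD (r.length - 1 - a) ' ' := by
  constructor
  · intro hpal a ha
    rw [List.getD_eq_getElem _ ' ' ha, List.getD_eq_getElem _ ' ' (by omega)]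
    calc r[a]'ha = r.reverse[a]'(by simpa using ha) := List.getElem_of_eq hpal ha
      _ = r[r.length - 1 - a]'(by omega) := List.getElem_reverse _
  · intro hp
    apply List.ext_getElem (by simp)
    intro a h1 h2
    rw [List.getElem_reverse]
    have hx := hp a h1
    rw [List.getD_eq_getElem _ ' ' h1, List.getD_eq_getElem _ ' ' (by omega)] at hx
    exact hx

lemma pvOk_iff_pal (l : List Char) (i : Nat) (hi : i < l.length) (e h : Int)
    (he : e = 1 - (l.length : Int) % 2) (hh : h = (l.length : Int) / 2) :
    pvOk (l ++ l) e ((i : Int) + h) (h + 1 - e) ↔ pvRot l i = (pvRot l i).reverse := by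
  set N := l.length with hN
  set t := l ++ l with ht
  set r := pvRot l i with hr
  have htlen : t.length = N + N := by rw [ht, List.length_append]
  have hrlen : r.length = N := pvRot_length l i
  have hwin : ∀ a : Nat, a < N → r.getD a ' ' = t.getD (i + a) ' ' := by
    intro a ha
    have e1 : r = (t.drop i).take N := pvRot_eq_window l i (by omega)
    have h1 : a < r.length := by omega
    have h2 : i + a < t.length := by omega
    rw [List.getD_eq_getElem r ' ' h1, List.getD_eq_getElem t ' ' h2]
    rw [List.getElem_of_eq e1 h1]
    simp [List.getElem_take, List.getElem_drop]
  -- parity: N = 2*m + 1 - em with em ∈ {0,1}, e = em, h = m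
  obtain ⟨m, em, hem, hNm, heem, hhm⟩ :
      ∃ (m em : Nat), em ≤ 1 ∧ N = 2 * m + 1 - em ∧ e = (em : Int) ∧ h = (m : Int) := by
    rcases Nat.even_or_odd N with ⟨m, hm⟩ | ⟨m, hm⟩
    · exact ⟨m, 1, le_rfl, by omega, by omega, by omega⟩
    · exact ⟨m, 0, by omega, by omega, by omega, by omega⟩
  have hmN : 0 < N := by omega
  -- pvOk in Nat form
  have hok_nat : pvOk t e ((i : Int) + h) (h + 1 - e) ↔
      ∀ j : Nat, j < m + 1 - em → t.getD (i + m - j - em) ' ' = t.getD (i + m + j) ' ' := by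
    constructor
    · intro hok j hj
      obtain ⟨h1, h2, h3⟩ := hok (j : Int) (by omega) (by omega)
      unfold pvTA at h3
      have ei1 : ((i : Int) + h - (j : Int) - e).toNat = i + m - j - em := by omega
      have ei2 : ((i : Int) + h + (j : Int)).toNat = i + m + j := by omega
      rw [ei1, ei2] at h3
      exact h3
    · intro hp j hj0 hjlt
      refine ⟨by omega, by omega, ?_⟩
      unfold pvTA
      have hx := hp j.toNat (by omega)
      have ei1 : ((i : Int) + h - j - e).toNat = i + m - j.toNat - em := by omega
      have ei2 : ((i : Int) + h + j).toNat = i + m + j.toNat := by omega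
      rw [ei1, ei2]
      exact hx
  rw [hok_nat, pvPal_iff_pairs r, hrlen]
  constructor
  · intro hp
    -- first half-range pairs, then symmetry
    have hhalf : ∀ a : Nat, m ≤ a → a < N → r.getD a ' ' = r.getD (N - 1 - a) ' ' := by
      intro a ha1 ha2
      have hj : a - m < m + 1 - em := by omega
      have hx := hp (a - m) hj
      have e1 : i + m + (a - m) = i + a := by omega
      have e2 : i + m - (a - m) - em = i + (N - 1 - a) := by omega
      rw [e1, e2] at hx
      rw [hwin a ha2, hwin (N - 1 - a) (by omega)]
      exact hx.symm
    intro a ha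
    rcases Nat.lt_or_ge a m with h' | h'
    · have hx := hhalf (N - 1 - a) (by omega) (by omega)
      have e1 : N - 1 - (N - 1 - a) = a := by omega
      rw [e1] at hx
      exact hx.symm
    · exact hhalf a h' ha
  · intro hp j hj
    have hx := hp (m + j) (by omega)
    have e1 : N - 1 - (m + j) = m - j - em := by omega
    rw [e1] at hx
    rw [hwin (m + j) (by omega), hwin (m - j - em) (by omega)] at hx
    have e2 : i + (m - j - em) = i + m - j - em := by omega
    have e3 : i + (m + j) = i + m + j := by omega
    rw [e2, e3] at hx
    exact hx.symm

lemma pvFind?_congr {α : Type} (xs : List α) (p q : α → Bool)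
    (h : ∀ x ∈ xs, p x = q x) : xs.find? p = xs.find? q := by
  induction xs with
  | nil => rfl
  | cons x xs ih =>
    simp only [List.find?_cons, h x (List.mem_cons_self)]
    cases hq : q x with
    | true => rfl
    | false => exact ih (fun y hy => h y (List.mem_cons_of_mem _ hy))

-- B returns the first palindromic rotation too
lemma B_eq (s : String) :
    longest_palindromic_rotation_alt s =
      (match (List.range s.toList.length).find? (pvP s.toList) with
       | some k => String.ofList (pvRot s.toList k)
       | none => "No palindromic rotation") := by
  set l := s.toList with hl
  set N := l.length with hN
  set t := l ++ l with ht
  set e : Int := 1 - PySem.Int.mod (N : Int) 2 with hedef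
  set h : Int := PySem.Int.floordiv (N : Int) 2 with hhdef
  have hmod : PySem.Int.mod (N : Int) 2 = (N : Int) % 2 := by
    rw [PySem.Int.mod_eq_emod_of_pos (by omega)]
  have hdiv : PySem.Int.floordiv (N : Int) 2 = (N : Int) / 2 := by
    rw [PySem.Int.floordiv_eq_ediv_of_pos (by omega)]
  have he' : e = 1 - (N : Int) % 2 := by rw [hedef, hmod]
  have hh' : h = (N : Int) / 2 := by rw [hhdef, hdiv]
  have he01 : e = 0 ∨ e = 1 := by omega
  have htlen : t.length = N + N := by rw [ht, List.length_append]
  -- the B-side predicate agrees with pvP on range N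
  have hpred : ∀ k ∈ List.range N,
      (decide (h + 1 - e ≤ (pvManacher t e).getD ((0 + (k : Int)) + h).toNat 0)) = pvP l k := by
    intro k hk
    have hkN : k < N := List.mem_range.mp hk
    have hidxnn : (0 : Int) ≤ 0 + (k : Int) + h := by omega
    have hidx : ((0 + (k : Int)) + h).toNat < t.length := by omega
    rw [pvManacher_getD t e he01 _ hidx]
    have hcast : ((((0 + (k : Int)) + h).toNat : Nat) : Int) = (k : Int) + h := by omega
    rw [hcast]
    rw [pvP]
    have hiff := (pvMaxK_ge_iff t e ((k : Int) + h) (h + 1 - e)).trans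
      (pvOk_iff_pal l k hkN e h he' hh')
    exact decide_eq_decide.mpr hiff
  show (match (PySem.List.pyRange 0 (N : Int) 1).find?
      (fun i => decide (h + 1 - e ≤ (pvManacher t e).getD (i + h).toNat 0)) with
    | some i => String.ofList (PySem.List.slice t (some i) (some (i + (N : Int))))
    | none => "No palindromic rotation") = _
  rw [PySem.List.pyRange_one]
  simp only [sub_zero, Int.toNat_natCast]
  rw [List.find?_map]
  simp only [Function.comp_def]
  rw [pvFind?_congr (List.range N)
    (fun k : Nat => decide (h + 1 - e ≤ (pvManacher t e).getD ((0 + (k : Int)) + h).toNat 0))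
    (pvP l) (fun k hk => hpred k hk)]
  cases hf : (List.range N).find? (pvP l) with
  | none => rfl
  | some k =>
    have hkN : k < N := List.mem_range.mp (List.mem_of_find?_eq_some hf)
    simp only [Option.map_some]
    have hslice : PySem.List.slice t (some (0 + (k : Int))) (some ((0 + (k : Int)) + (N : Int))) =
        (t.drop k).take N := by
      rw [zero_add]
      exact PySem.List.slice_natCast_add t k N
    rw [hslice, ← pvRot_eq_window l k (by omega)]

-- ===== VERDICT (by name: the statement is the Claim_ definition above) =====
theorem longest_palindromic_rotation_spec : Claim_equal_longest_palindromic_rotation := by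
  intro s _
  unfold Spec_longest_palindromic_rotation
  rw [A_eq s, B_eq s, pvAfold_char, List.range_eq_range']
  cases hf : (List.range' 0 s.toList.length).find? (pvP s.toList) with
  | none => simp
  | some k =>
    have hk : k ∈ List.range' 0 s.toList.length := List.mem_of_find?_eq_some hf
    have hlen : 0 < s.toList.length := by
      rcases List.mem_range'.mp hk with ⟨_, _⟩; omega
    have hne : pvRot s.toList k ≠ [] := by
      intro h
      have hl := pvRot_length s.toList k
      rw [h] at hl
      simp only [List.length_nil] at hl
      omega
    simp [hne]
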